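-- pv_equiv track=rewrite | github.com/vdorovatas/rLiVS | utils.py | dededuplicate_sentences
-- ===== SOURCE A (Python) =====
-- def dededuplicate_sentences(token_ids, dot_id):
--     seen = set()
--     result = []
--     sentence = []
--     for token in token_ids:
--         sentence.append(token)
--         if token == dot_id:
--             sentence_tuple = tuple(sentence)
--             if sentence_tuple not in seen:
--                 seen.add(sentence_tuple)
--                 result.extend(sentence)
--             sentence = []
--
--     # Handle last sentence if no trailing dot
--     if sentence:
--         sentence_tuple = tuple(sentence)
--         if sentence_tuple not in seen:
--             result.extend(sentence)
--
--     return result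
-- ===== SOURCE B (Python) =====
-- def dededuplicate_sentences(token_ids, dot_id):
--     # Split the stream into sentences (each ending with dot_id, plus a
--     # possible trailing dot-less one).
--     sentences = []
--     cur = []
--     for token in token_ids:
--         cur.append(token)
--         if token == dot_id:
--             sentences.append(cur)
--             cur = []
--     if cur:
--         sentences.append(cur)
--
--     # Dedup without any seen-set: emit the first remaining sentence and
--     # filter out all of its later copies, repeatedly.
--     result = []
--     while sentences:
--         head = sentences[0]
--         result.extend(head)
--         sentences = [s for s in sentences[1:] if s != head]
--     return result
-- ===== Notes on version B (the rewrite author's own statement) =====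
-- stated objective: alternative
-- what changed: B removes A's seen-set entirely: it splits the stream into sentences, then dedups by repeatedly emitting the first remaining sentence and filtering out all its later copies (nub-by-filtering), instead of A's single fused loop with seen-set membership bookkeeping.
import Mathlib
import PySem

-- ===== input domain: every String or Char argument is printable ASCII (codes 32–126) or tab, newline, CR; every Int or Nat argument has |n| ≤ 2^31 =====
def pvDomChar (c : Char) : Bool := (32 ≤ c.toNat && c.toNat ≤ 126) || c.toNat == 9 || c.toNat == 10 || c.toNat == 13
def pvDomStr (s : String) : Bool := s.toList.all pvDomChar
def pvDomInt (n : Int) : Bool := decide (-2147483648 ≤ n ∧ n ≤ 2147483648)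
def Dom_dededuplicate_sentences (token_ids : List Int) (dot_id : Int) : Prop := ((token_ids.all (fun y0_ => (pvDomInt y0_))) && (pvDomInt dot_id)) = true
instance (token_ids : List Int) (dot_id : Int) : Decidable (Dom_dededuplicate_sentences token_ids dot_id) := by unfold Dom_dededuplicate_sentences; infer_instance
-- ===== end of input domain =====

-- B splits the stream into sentences, then dedups without a seen-set by repeatedly emitting the first remaining sentence and filtering out its later copies (alternative decomposition; quadratic in the number of sentences, not claimed faster).


-- ===== PORT A =====
-- one iteration of A's for-loop; state = (seen, result, sentence)
def aStep (dot_id : Int) (st : PySem.Set (List Int) × List Int × List Int) (token : Int) :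
    PySem.Set (List Int) × List Int × List Int :=
  let seen := st.1
  let result := st.2.1
  let sentence := st.2.2 ++ [token]
  if token == dot_id then
    if PySem.Set.contains seen sentence then (seen, result, [])
    else (PySem.Set.add seen sentence, result ++ sentence, [])
  else (seen, result, sentence)

def dededuplicate_sentences (token_ids : List Int) (dot_id : Int) : List Int :=
  let st := token_ids.foldl (aStep dot_id) (PySem.Set.empty, [], [])
  -- handle last sentence if no trailing dot
  if st.2.2 ≠ [] then
    if PySem.Set.contains st.1 st.2.2 then st.2.1 else st.2.1 ++ st.2.2
  else st.2.1

-- ===== PORT B =====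
-- pass 1: split the token stream into sentences (cur = current partial sentence)
def splitSentences (dot_id : Int) : List Int → List Int → List (List Int)
  | [], cur => if cur = [] then [] else [cur]
  | t :: rest, cur =>
      if t == dot_id then (cur ++ [t]) :: splitSentences dot_id rest []
      else splitSentences dot_id rest (cur ++ [t])

-- pass 2: B's while-loop — emit the head sentence, drop all its later copies
def nubFlat : List (List Int) → List Int
  | [] => []
  | s :: rest => s ++ nubFlat (rest.filter (fun t => !(t == s)))
termination_by l => l.length
decreasing_by
  simpa using Nat.lt_succ_of_le ((List.length_filter_le _ _).trans (by simp))

def dededuplicate_sentences_alt (token_ids : List Int) (dot_id : Int) : List Int :=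
  nubFlat (splitSentences dot_id token_ids [])

-- ===== PRECONDITION & SPEC =====
def Spec_dededuplicate_sentences (token_ids : List Int) (dot_id : Int) (out : List Int) : Prop := out = dededuplicate_sentences_alt token_ids dot_id
instance (token_ids : List Int) (dot_id : Int) (out : List Int) : Decidable (Spec_dededuplicate_sentences token_ids dot_id out) := by unfold Spec_dededuplicate_sentences; infer_instance

-- ===== CLAIM (what is proved, stated in full; the proofs are below) =====
def Claim_equal_dededuplicate_sentences : Prop := ∀ (token_ids : List Int) (dot_id : Int), Dom_dededuplicate_sentences token_ids dot_id → Spec_dededuplicate_sentences token_ids dot_id (dededuplicate_sentences token_ids dot_id)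

-- ===== LEMMAS AND PROOFS =====
-- A's epilogue, applied to an arbitrary loop state
def aFinish (st : PySem.Set (List Int) × List Int × List Int) : List Int :=
  if st.2.2 ≠ [] then
    if PySem.Set.contains st.1 st.2.2 then st.2.1 else st.2.1 ++ st.2.2
  else st.2.1

-- proof-side bridge: A's seen-set dedup, expressed over a list of sentences
def dedupFlat (seen : PySem.Set (List Int)) : List (List Int) → List Int
  | [] => []
  | s :: rest =>
      if PySem.Set.contains seen s then dedupFlat seen rest
      else s ++ dedupFlat (PySem.Set.add seen s) rest

-- invariant: running A's loop from any state and finishing equals the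
-- seen-set dedup of the sentences of the remaining tokens (with cur pending)
theorem loop_eq (dot_id : Int) (tks : List Int) :
    ∀ (seen : PySem.Set (List Int)) (result cur : List Int),
      aFinish (tks.foldl (aStep dot_id) (seen, result, cur)) =
      result ++ dedupFlat seen (splitSentences dot_id tks cur) := by
  induction tks with
  | nil =>
      intro seen result cur
      simp only [List.foldl, aFinish, splitSentences]
      by_cases h : cur = []
      · simp [h, dedupFlat]
      · by_cases hc : cur ∈ seen <;> simp [h, dedupFlat, hc]
  | cons t rest ih =>
      intro seen result cur
      simp only [List.foldl, splitSentences, aStep]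
      by_cases ht : (t == dot_id) = true
      · by_cases hc : cur ++ [t] ∈ seen <;>
          simp [ht, hc, ih, dedupFlat]
      · simp [ht, ih]

-- seen-set dedup = filtering nub of the not-yet-seen sentences
theorem dedupFlat_eq_nubFlat (ss : List (List Int)) :
    ∀ seen, dedupFlat seen ss =
      nubFlat (ss.filter (fun t => !(PySem.Set.contains seen t))) := by
  induction ss with
  | nil => intro seen; simp [dedupFlat, nubFlat]
  | cons s rest ih =>
      intro seen
      by_cases hc : s ∈ seen
      · simp [dedupFlat, hc, ih]
      · have hfilt : rest.filter (fun t => !(PySem.Set.contains (PySem.Set.add seen s) t)) =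
            (rest.filter (fun t => !(PySem.Set.contains seen t))).filter (fun t => !(t == s)) := by
          rw [List.filter_filter]
          apply List.filter_congr
          intro t _
          by_cases hts : t = s
          · simp [hts, PySem.Set.mem_add]
          · simp [PySem.Set.mem_add, hts]
        have hcons : (s :: rest).filter (fun t => !(PySem.Set.contains seen t)) =
            s :: rest.filter (fun t => !(PySem.Set.contains seen t)) :=
          List.filter_cons_of_pos (by simp [hc])
        have hcf : ¬ (PySem.Set.contains seen s = true) := by
          simp [PySem.Set.contains_eq_listContains]; exact hc
        rw [hcons]
        simp only [dedupFlat, nubFlat, ih, hfilt]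
        rw [if_neg hcf]

-- ===== VERDICT (by name: the statement is the Claim_ definition above) =====
theorem dededuplicate_sentences_spec : Claim_equal_dededuplicate_sentences := by
  intro token_ids dot_id _
  show dededuplicate_sentences token_ids dot_id = dededuplicate_sentences_alt token_ids dot_id
  have h := loop_eq dot_id token_ids PySem.Set.empty [] []
  have h2 := dedupFlat_eq_nubFlat (splitSentences dot_id token_ids []) PySem.Set.empty
  show aFinish (List.foldl (aStep dot_id) (PySem.Set.empty, [], []) token_ids) =
    dededuplicate_sentences_alt token_ids dot_id
  unfold dededuplicate_sentences_alt
  rw [h, h2]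
  simp [PySem.Set.empty]
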